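-- pv_equiv track=rewrite | github.com/umitkara/codewarsAssemblerKata | asm2.py | comment_label
-- ===== SOURCE A (Python) =====
-- from typing import List
--
-- def comment_label(program:List[str]):
--     labels = {}
--     i = 0
--     while i < len(program):
--         if program[i] == '':
--             program.pop(i)
--             continue
--         # Replace multiple whitespaces with one
--         program[i] = ' '.join(program[i].split())
--         # Find and remove comment lines
--         if program[i].startswith(';'):
--             program.pop(i)
--             continue
--         # Find and remove inline comments
--         if ';' in program[i]:
--             program[i] = program[i].split(';')[0]
--         # Find label lines and store them into labels dict
--         if len(program[i].split(' ')) == 1 and program[i].endswith(':'):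
--             labels[program[i][:-1]] = i
--         i += 1
--     return (labels,program)
-- ===== SOURCE B (Python) =====
-- def comment_label(program):
--     # Pass 1: clean the lines (drop raw-empty lines, normalize whitespace,
--     # drop comment lines, strip inline comments).
--     cleaned = []
--     for line in program:
--         if line == '':
--             continue
--         line = ' '.join(line.split())
--         if line.startswith(';'):
--             continue
--         if ';' in line:
--             line = line.split(';')[0]
--         cleaned.append(line)
--     # Pass 2: collect label lines with their indices.
--     labels = {}
--     for i, line in enumerate(cleaned):
--         if len(line.split(' ')) == 1 and line.endswith(':'):
--             labels[line[:-1]] = i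
--     # Mutate the argument in place, as the original does.
--     program[:] = cleaned
--     return (labels, program)
-- ===== Notes on version B (the rewrite author's own statement) =====
-- stated objective: simpler
-- what changed: A's single while-loop that juggles an index while popping and rewriting the list in place is replaced by two plain passes: one building the cleaned line list, then one over enumerate(cleaned) collecting the labels (argument still mutated via slice assignment).
import Mathlib
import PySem

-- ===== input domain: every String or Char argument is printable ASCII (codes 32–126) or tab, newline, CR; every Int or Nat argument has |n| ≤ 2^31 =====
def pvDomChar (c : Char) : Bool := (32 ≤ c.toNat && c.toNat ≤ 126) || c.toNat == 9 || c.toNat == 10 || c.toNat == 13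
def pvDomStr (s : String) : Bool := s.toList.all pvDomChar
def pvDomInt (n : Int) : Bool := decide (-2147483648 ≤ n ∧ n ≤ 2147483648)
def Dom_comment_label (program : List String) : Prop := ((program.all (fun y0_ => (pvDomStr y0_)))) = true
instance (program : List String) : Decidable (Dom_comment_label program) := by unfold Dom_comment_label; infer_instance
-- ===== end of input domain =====

-- B replaces A's single index-juggling while-loop (with in-place pops) by two plain passes:
-- clean the lines, then collect the labels; same return value (equivalence proved about the
-- RETURN value only — Python A mutates its argument in place, and Python B performs the same
-- mutation via program[:] = cleaned).

-- ===== PORT A =====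
-- A's while-loop: state = (labels, program, i); program.pop(i) at an in-range i is
-- List.eraseIdx i (exact), program[i] = ... is List.set (exact).
-- s.split(';') with the non-empty literal separator ';' never raises, so
-- (PySem.Str.split? s ";").getD [] is exact (split? is none only for an empty separator).
def commentLoopA (labels : PySem.Dict String Int) (prog : List String) (i : Nat) :
    PySem.Dict String Int × List String :=
  if h : i < prog.length then
    if prog[i] = "" then
      commentLoopA labels (prog.eraseIdx i) i
    else
      let n := PySem.Str.join " " (PySem.Str.split₀ prog[i])
      let prog1 := prog.set i n
      if PySem.Str.startswith n ";" then
        commentLoopA labels (prog1.eraseIdx i) i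
      else
        let n2 := if PySem.Str.isIn ";" n then ((PySem.Str.split? n ";").getD []).headD "" else n
        let prog2 := prog1.set i n2
        let labels' :=
          if ((PySem.Str.split? n2 " ").getD []).length == 1 && PySem.Str.endswith n2 ":" then
            labels.insert (PySem.Str.slice n2 none (some (-1))) (i : Int)
          else labels
        commentLoopA labels' prog2 (i + 1)
  else (labels, prog)
termination_by prog.length - i
decreasing_by
  all_goals simp only [List.length_eraseIdx, List.length_set, if_pos h]; omega

def comment_label (program : List String) : (List (String × Int)) × List String :=
  let r := commentLoopA PySem.Dict.empty program 0
  (r.1.items, r.2)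

-- ===== PORT B =====
-- B pass 1: build the cleaned list (Python appends in order; structural recursion
-- producing the elements in the same order).
def cleanPassB : List String → List String
  | [] => []
  | line :: rest =>
    if line = "" then cleanPassB rest
    else
      let n := PySem.Str.join " " (PySem.Str.split₀ line)
      if PySem.Str.startswith n ";" then cleanPassB rest
      else
        (if PySem.Str.isIn ";" n then ((PySem.Str.split? n ";").getD []).headD "" else n)
          :: cleanPassB rest

-- B pass 2: for i, line in enumerate(cleaned): record labels.
def labelPassB : PySem.Dict String Int → Nat → List String → PySem.Dict String Int
  | labels, _, [] => labels
  | labels, i, line :: rest =>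
    labelPassB
      (if ((PySem.Str.split? line " ").getD []).length == 1 && PySem.Str.endswith line ":" then
        labels.insert (PySem.Str.slice line none (some (-1))) (i : Int)
      else labels)
      (i + 1) rest

def comment_label_alt (program : List String) : (List (String × Int)) × List String :=
  let cleaned := cleanPassB program
  ((labelPassB PySem.Dict.empty 0 cleaned).items, cleaned)

-- ===== PRECONDITION & SPEC =====
def Spec_comment_label (program : List String) (out : (List (String × Int)) × List String) : Prop := out = comment_label_alt program
instance (program : List String) (out : (List (String × Int)) × List String) : Decidable (Spec_comment_label program out) := by unfold Spec_comment_label; infer_instance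

-- ===== CLAIM (what is proved, stated in full; the proofs are below) =====
def Claim_equal_comment_label : Prop := ∀ (program : List String), Dom_comment_label program → Spec_comment_label program (comment_label program)

-- ===== LEMMAS AND PROOFS =====
lemma eraseIdx_append_cons {α : Type} (d : List α) (x : α) (ls : List α) :
    (d ++ x :: ls).eraseIdx d.length = d ++ ls := by
  induction d with
  | nil => rfl
  | cons a d ih => simp [ih]

lemma set_append_cons {α : Type} (d : List α) (x y : α) (ls : List α) :
    (d ++ x :: ls).set d.length y = d ++ y :: ls := by
  induction d with
  | nil => rfl
  | cons a d ih => simp [ih]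

-- A's loop on (done ++ rest) at i = done.length, with done already cleaned, equals B's
-- two passes applied to rest (labels continued from index done.length).
lemma loopA_eq (rest : List String) : ∀ (done : List String) (labels : PySem.Dict String Int),
    commentLoopA labels (done ++ rest) done.length
      = (labelPassB labels done.length (cleanPassB rest), done ++ cleanPassB rest) := by
  induction rest with
  | nil =>
    intro done labels
    rw [commentLoopA]
    simp [cleanPassB, labelPassB]
  | cons l ls ih =>
    intro done labels
    have hlen : done.length < (done ++ l :: ls).length := by simp
    have hget : (done ++ l :: ls)[done.length]'hlen = l := List.getElem_of_append rfl rfl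
    rw [commentLoopA, dif_pos hlen]
    simp only [hget]
    by_cases h0 : l = ""
    · rw [if_pos h0, eraseIdx_append_cons, ih done labels]
      simp [cleanPassB, h0]
    · rw [if_neg h0]
      simp only [set_append_cons]
      set n := PySem.Str.join " " (PySem.Str.split₀ l) with hn
      by_cases hs : PySem.Str.startswith n ";" = true
      · rw [if_pos hs, eraseIdx_append_cons, ih done labels]
        have hclean : cleanPassB (l :: ls) = cleanPassB ls := by
          simp only [cleanPassB]
          rw [if_neg h0, ← hn, if_pos hs]
        rw [hclean]
      · rw [if_neg hs]
        set n2 := if PySem.Str.isIn ";" n then ((PySem.Str.split? n ";").getD []).headD "" else n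
          with hn2
        set labels' :=
          if ((PySem.Str.split? n2 " ").getD []).length == 1 && PySem.Str.endswith n2 ":" then
            labels.insert (PySem.Str.slice n2 none (some (-1))) (done.length : Int)
          else labels with hl'
        have hstep : commentLoopA labels' (done ++ n2 :: ls) (done.length + 1)
            = commentLoopA labels' ((done ++ [n2]) ++ ls) (done ++ [n2]).length := by
          simp
        rw [hstep, ih (done ++ [n2]) labels']
        have hclean : cleanPassB (l :: ls) = n2 :: cleanPassB ls := by
          simp only [cleanPassB]
          rw [if_neg h0, ← hn, if_neg hs, ← hn2]
        have hlab : labelPassB labels done.length (n2 :: cleanPassB ls)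
            = labelPassB labels' (done.length + 1) (cleanPassB ls) := by
          simp only [labelPassB]
          rw [← hl']
        rw [hclean, hlab]
        simp

theorem comment_label_eq_alt (program : List String) :
    comment_label program = comment_label_alt program := by
  have h := loopA_eq program [] PySem.Dict.empty
  simp only [List.nil_append, List.length_nil] at h
  simp [comment_label, comment_label_alt, h]

-- ===== VERDICT (by name: the statement is the Claim_ definition above) =====
theorem comment_label_spec : Claim_equal_comment_label := by
  intro program _
  exact comment_label_eq_alt program
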